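-- pv_equiv track=rewrite | github.com/theri6v/CodeSprintSolutions | GeekForGeek/Problem Of The Day/Triplet Family.py | findTriplet
-- ===== SOURCE A (Python) =====
-- def findTriplet(arr):
--     # Sort the array to enable searching only in the remaining part of the array for each element
--     arr.sort()
--     n = len(arr)
--
--     # Iterate through each unique pair (i, j)
--     for i in range(n - 1):
--         for j in range(i + 1, n):
--             s = arr[i] + arr[j]
--             # Use a hash set to check if the sum exists in the remaining elements
--             if s in arr[j + 1:]:
--                 return True
--     return False
-- ===== SOURCE B (Python) =====
-- def findTriplet(arr):
--     # Two-pointer over the sorted array: for each candidate "third" element arr[k],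
--     # scan l from the left and r from just below k inward. O(n^2) vs A's O(n^3).
--     arr.sort()
--     n = len(arr)
--     for k in range(n):
--         l, r = 0, k - 1
--         while l < r:
--             s = arr[l] + arr[r]
--             if s == arr[k]:
--                 return True
--             if s < arr[k]:
--                 l += 1
--             else:
--                 r -= 1
--     return False
-- ===== Notes on version B (the rewrite author's own statement) =====
-- stated objective: faster
-- what changed: Replaced A's nested pair loop with a per-pass slice-membership scan (O(n^3)) by a sorted two-pointer search: for each candidate third element arr[k], two indices l and r=k-1 move inward using the sorted order, giving O(n^2).
import Mathlib
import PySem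

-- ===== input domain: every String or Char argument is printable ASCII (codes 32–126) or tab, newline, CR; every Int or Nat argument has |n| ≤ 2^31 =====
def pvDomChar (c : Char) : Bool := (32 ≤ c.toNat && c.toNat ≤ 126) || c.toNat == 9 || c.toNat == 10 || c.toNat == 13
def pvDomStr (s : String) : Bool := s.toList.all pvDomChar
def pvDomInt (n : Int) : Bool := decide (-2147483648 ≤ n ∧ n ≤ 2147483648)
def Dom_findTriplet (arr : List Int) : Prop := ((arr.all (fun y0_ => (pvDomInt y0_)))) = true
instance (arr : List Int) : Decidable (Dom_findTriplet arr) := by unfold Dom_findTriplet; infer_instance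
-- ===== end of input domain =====

-- B replaces A's pair-enumeration + suffix-membership scan with a sorted two-pointer
-- search (objective: faster, measured). Both Pythons sort arr in
-- place; the equivalence proved here is about the return value only (B performs the
-- same in-place sort as A).


-- ===== PORT A =====
def findTriplet (arr : List Int) : Bool :=
  let s := PySem.List.sorted arr (fun x => x) false
  let n : Int := s.length
  (PySem.List.pyRange 0 (n - 1) 1).any (fun i =>
    (PySem.List.pyRange (i + 1) n 1).any (fun j =>
      let sum := PySem.List.pyGetD s i 0 + PySem.List.pyGetD s j 0
      (PySem.List.slice s (some (j + 1)) none).contains sum))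

-- ===== PORT B =====
-- the 'while l < r' loop of Source B, for a fixed target t = arr[k]
def twoPtrLoop (s : List Int) (t : Int) (l r : Nat) : Bool :=
  if h : l < r then
    let x := s.getD l 0 + s.getD r 0
    if x = t then true
    else if x < t then twoPtrLoop s t (l + 1) r
    else twoPtrLoop s t l (r - 1)
  else false
termination_by r - l
decreasing_by all_goals omega

def findTriplet_alt (arr : List Int) : Bool :=
  let s := PySem.List.sorted arr (fun x => x) false
  (List.range s.length).any (fun k => twoPtrLoop s (s.getD k 0) 0 (k - 1))

-- ===== PRECONDITION & SPEC =====
def Spec_findTriplet (arr : List Int) (out : Bool) : Prop := out = findTriplet_alt arr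
instance (arr : List Int) (out : Bool) : Decidable (Spec_findTriplet arr out) := by unfold Spec_findTriplet; infer_instance

-- ===== CLAIM (what is proved, stated in full; the proofs are below) =====
def Claim_equal_findTriplet : Prop := ∀ (arr : List Int), Dom_findTriplet arr → Spec_findTriplet arr (findTriplet arr)

-- ===== LEMMAS AND PROOFS =====

-- the predicate both programs decide on the sorted list s:
-- some strictly earlier pair of elements sums to a later element
def Trip (s : List Int) : Prop :=
  ∃ i j k : Nat, i < j ∧ j < k ∧ k < s.length ∧ s.getD i 0 + s.getD j 0 = s.getD k 0

theorem sorted_getD_mono {s : List Int} (hs : s.Pairwise (· ≤ ·))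
    {i j : Nat} (hij : i ≤ j) (hj : j < s.length) : s.getD i 0 ≤ s.getD j 0 := by
  rcases Nat.lt_or_eq_of_le hij with h | h
  · have := (List.pairwise_iff_getElem.mp hs) i j (Nat.lt_trans h hj) hj h
    simpa [List.getD_eq_getElem, Nat.lt_trans h hj, hj] using this
  · subst h; rfl

theorem twoPtrLoop_iff {s : List Int} (hs : s.Pairwise (· ≤ ·)) (t : Int) :
    ∀ (n l r : Nat), r - l ≤ n → r < s.length →
      (twoPtrLoop s t l r = true ↔
        ∃ i j : Nat, l ≤ i ∧ i < j ∧ j ≤ r ∧ s.getD i 0 + s.getD j 0 = t) := by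
  intro n
  induction n with
  | zero =>
    intro l r hle hr
    rw [twoPtrLoop, dif_neg (by omega : ¬ l < r)]
    simp only [false_iff, Bool.false_eq_true, false_iff]
    rintro ⟨i, j, h1, h2, h3, _⟩; omega
  | succ n ih =>
    intro l r hle hr
    rw [twoPtrLoop]
    by_cases hlr : l < r
    · rw [dif_pos hlr]
      by_cases heq : s.getD l 0 + s.getD r 0 = t
      · rw [if_pos heq]
        simp only [true_iff]
        exact ⟨l, r, Nat.le_refl l, hlr, Nat.le_refl r, heq⟩
      · by_cases hlt : s.getD l 0 + s.getD r 0 < t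
        · rw [if_neg heq, if_pos hlt]
          rw [ih (l + 1) r (by omega) hr]
          constructor
          · rintro ⟨i, j, h1, h2, h3, h4⟩; exact ⟨i, j, by omega, h2, h3, h4⟩
          · rintro ⟨i, j, h1, h2, h3, h4⟩
            refine ⟨i, j, ?_, h2, h3, h4⟩
            rcases Nat.lt_or_ge l i with h | h
            · omega
            · exfalso
              have hi : i = l := by omega
              subst hi
              have hmono : s.getD j 0 ≤ s.getD r 0 := sorted_getD_mono hs h3 hr
              omega
        · have hgt : t < s.getD l 0 + s.getD r 0 := by omega
          rw [if_neg heq, if_neg hlt]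
          rw [ih l (r - 1) (by omega) (by omega)]
          constructor
          · rintro ⟨i, j, h1, h2, h3, h4⟩; exact ⟨i, j, h1, h2, by omega, h4⟩
          · rintro ⟨i, j, h1, h2, h3, h4⟩
            refine ⟨i, j, h1, h2, ?_, h4⟩
            rcases Nat.lt_or_ge j r with h | h
            · omega
            · exfalso
              have hj : j = r := by omega
              subst hj
              have hmono : s.getD l 0 ≤ s.getD i 0 := sorted_getD_mono hs h1 (by omega)
              omega
    · rw [dif_neg hlr]
      simp only [Bool.false_eq_true, false_iff]
      rintro ⟨i, j, h1, h2, h3, _⟩; omega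

theorem alt_iff (s : List Int) (hs : s.Pairwise (· ≤ ·)) :
    ((List.range s.length).any (fun k => twoPtrLoop s (s.getD k 0) 0 (k - 1)) = true) ↔ Trip s := by
  rw [List.any_eq_true]
  constructor
  · rintro ⟨k, hk, h⟩
    rw [List.mem_range] at hk
    rw [twoPtrLoop_iff hs (s.getD k 0) (k - 1) 0 (k - 1) (Nat.le_refl _) (by omega)] at h
    obtain ⟨i, j, h1, h2, h3, h4⟩ := h
    exact ⟨i, j, k, h2, by omega, hk, h4⟩
  · rintro ⟨i, j, k, h1, h2, h3, h4⟩
    refine ⟨k, List.mem_range.mpr h3, ?_⟩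
    rw [twoPtrLoop_iff hs (s.getD k 0) (k - 1) 0 (k - 1) (Nat.le_refl _) (by omega)]
    exact ⟨i, j, Nat.zero_le i, h1, by omega, h4⟩

theorem findTriplet_iff (s : List Int) :
    ((PySem.List.pyRange 0 ((s.length : Int) - 1) 1).any (fun i =>
      (PySem.List.pyRange (i + 1) (s.length : Int) 1).any (fun j =>
        (PySem.List.slice s (some (j + 1)) none).contains
          (PySem.List.pyGetD s i 0 + PySem.List.pyGetD s j 0))) = true) ↔ Trip s := by
  rw [List.any_eq_true]
  constructor
  · rintro ⟨i, hi, h⟩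
    rw [List.any_eq_true] at h
    obtain ⟨j, hj, hc⟩ := h
    rw [PySem.List.mem_pyRange_one] at hi hj
    have h0i : 0 ≤ i := hi.1
    have h0j : 0 ≤ j := by omega
    rw [PySem.List.slice_from s (by omega : (0:Int) ≤ j + 1)] at hc
    have hmem : (PySem.List.pyGetD s i 0 + PySem.List.pyGetD s j 0) ∈ s.drop (j + 1).toNat := by
      simpa using hc
    obtain ⟨kk, hkk, hk⟩ := List.mem_iff_getElem.mp hmem
    rw [List.length_drop] at hkk
    rw [List.getElem_drop] at hk
    have hilen : i.toNat < s.length := by omega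
    have hjlen : j.toNat < s.length := by omega
    refine ⟨i.toNat, j.toNat, (j + 1).toNat + kk, by omega, by omega, by omega, ?_⟩
    rw [PySem.List.pyGetD_eq_getElem s 0 h0i (by omega), PySem.List.pyGetD_eq_getElem s 0 h0j (by omega)] at hk
    rw [List.getD_eq_getElem _ _ hilen, List.getD_eq_getElem _ _ hjlen,
      List.getD_eq_getElem _ _ (by omega : (j + 1).toNat + kk < s.length)]
    exact hk.symm
  · rintro ⟨i, j, k, h1, h2, h3, h4⟩
    refine ⟨(i : Int), ?_, ?_⟩
    · rw [PySem.List.mem_pyRange_one]; omega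
    · rw [List.any_eq_true]
      refine ⟨(j : Int), ?_, ?_⟩
      · rw [PySem.List.mem_pyRange_one]; omega
      · rw [PySem.List.slice_from s (by omega : (0:Int) ≤ (j : Int) + 1)]
        have : (PySem.List.pyGetD s (i : Int) 0 + PySem.List.pyGetD s (j : Int) 0) ∈
            s.drop ((j : Int) + 1).toNat := by
          rw [List.mem_iff_getElem]
          refine ⟨k - (j + 1), by rw [List.length_drop]; omega, ?_⟩
          rw [List.getElem_drop]
          rw [PySem.List.pyGetD_eq_getElem s 0 (by omega) (by omega),
            PySem.List.pyGetD_eq_getElem s 0 (by omega) (by omega)]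
          rw [List.getD_eq_getElem _ _ (by omega : i < s.length),
            List.getD_eq_getElem _ _ (by omega : j < s.length),
            List.getD_eq_getElem _ _ h3] at h4
          have hi' : (i : Int).toNat = i := by omega
          have hj' : (j : Int).toNat = j := by omega
          have hk' : ((j : Int) + 1).toNat + (k - (j + 1)) = k := by omega
          simp only [hi', hj', hk']
          exact h4.symm
        simpa using this

-- ===== VERDICT (by name: the statement is the Claim_ definition above) =====
theorem findTriplet_spec : Claim_equal_findTriplet := by
  intro arr _
  unfold Spec_findTriplet findTriplet findTriplet_alt
  set s := PySem.List.sorted arr (fun x => x) false with hsdef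
  have hs : s.Pairwise (· ≤ ·) := by
    simpa using PySem.List.sorted_pairwise arr (fun x => x)
  rw [Bool.eq_iff_iff]
  exact (findTriplet_iff s).trans (alt_iff s hs).symm
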